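-- pv_equiv track=rewrite | github.com/sissythem/argument_mining | app/src/utils/utils.py | bio_tag_lbl_per_token
-- ===== SOURCE A (Python) =====
-- def bio_tag_lbl_per_token(tokens_labels_tuple, other_label="O"):
--     previous_label = None
--     tokens, labels = [], []
--     for token, label in tokens_labels_tuple:
--         if token is None or token == "":
--             continue
--         tokens.append(token)
--         if label == other_label:
--             labels.append(label)
--         else:
--             if previous_label == label:
--                 labels.append(f"I-{label}")
--             else:
--                 labels.append(f"B-{label}")
--         previous_label = label
--     tokens = tuple(tokens)
--     labels = tuple(labels)
--     return tokens, labels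
-- ===== SOURCE B (Python) =====
-- def bio_tag_lbl_per_token(tokens_labels_tuple, other_label="O"):
--     kept = [(t, l) for t, l in tokens_labels_tuple if t is not None and t != ""]
--     tokens = tuple(t for t, _ in kept)
--     labels = []
--     rest = [l for _, l in kept]
--     while rest:
--         lbl = rest[0]
--         k = 1
--         while k < len(rest) and rest[k] == lbl:
--             k += 1
--         if lbl == other_label:
--             labels.extend([lbl] * k)
--         else:
--             labels.extend(["B-" + lbl] + ["I-" + lbl] * (k - 1))
--         rest = rest[k:]
--     return tokens, tuple(labels)
-- ===== Notes on version B (the rewrite author's own statement) =====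
-- stated objective: alternative
-- what changed: Replaces the stateful per-token loop (mutable previous_label compared at each element) by run-length grouping: filter kept pairs, split the kept labels into maximal runs of equal labels, and emit each run's tags in bulk ([lbl]*k for the other label, ['B-'+lbl] + ['I-'+lbl]*(k-1) otherwise).
import Mathlib
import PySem

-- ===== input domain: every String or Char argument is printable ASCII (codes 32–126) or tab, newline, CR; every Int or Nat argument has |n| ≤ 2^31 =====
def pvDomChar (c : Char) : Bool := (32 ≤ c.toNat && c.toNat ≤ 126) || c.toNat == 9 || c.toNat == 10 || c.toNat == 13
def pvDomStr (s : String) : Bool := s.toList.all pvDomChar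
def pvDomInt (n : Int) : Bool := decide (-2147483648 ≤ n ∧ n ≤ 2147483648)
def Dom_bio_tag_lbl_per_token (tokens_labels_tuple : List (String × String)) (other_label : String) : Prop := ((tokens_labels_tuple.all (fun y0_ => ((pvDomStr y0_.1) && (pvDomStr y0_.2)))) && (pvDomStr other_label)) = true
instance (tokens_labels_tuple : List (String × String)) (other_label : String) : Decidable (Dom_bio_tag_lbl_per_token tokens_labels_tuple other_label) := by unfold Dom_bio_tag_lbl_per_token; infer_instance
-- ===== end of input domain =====

-- B replaces A's stateful per-token loop (mutable previous_label) by run-length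
-- grouping: split the kept labels into maximal runs of equal labels and emit each
-- run's tags in bulk. Alternative decomposition, same cost.


-- ===== PORT A =====
-- Stateful loop over the pairs: state = (previous_label, tokens, labels); tokens are
-- Strings, so Python's `token is None` branch can never fire and only `token == ""` skips.
def bio_tag_lbl_per_token (tokens_labels_tuple : List (String × String)) (other_label : String) : List String × List String :=
  let st := tokens_labels_tuple.foldl
    (fun (st : Option String × List String × List String) tl =>
      let (previous_label, tokens, labels) := st
      if tl.1 == "" then st
      else
        let tokens := tokens ++ [tl.1]
        let labels :=
          if tl.2 == other_label then labels ++ [tl.2]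
          else if previous_label == some tl.2 then labels ++ ["I-" ++ tl.2]
          else labels ++ ["B-" ++ tl.2]
        (some tl.2, tokens, labels))
    (none, [], [])
  (st.2.1, st.2.2)

-- ===== PORT B =====
-- Source B's outer `while rest:` loop becomes recursion on `rest`; the inner counting
-- while-loop (k) is the length of the run `takeWhile (== lbl)`, and `rest = rest[k:]`
-- is `dropWhile (== lbl)`; the bulk emissions are List.replicate.
def pvTagRuns (other_label : String) (rest : List String) : List String :=
  match rest with
  | [] => []
  | lbl :: tl =>
      let run := tl.takeWhile (fun x => x == lbl)
      (if lbl == other_label then List.replicate (run.length + 1) lbl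
       else ("B-" ++ lbl) :: List.replicate run.length ("I-" ++ lbl)) ++
      pvTagRuns other_label (tl.dropWhile (fun x => x == lbl))
termination_by rest.length
decreasing_by
  simp only [List.length_cons]
  exact Nat.lt_succ_of_le (List.length_dropWhile_le _ _)

def bio_tag_lbl_per_token_alt (tokens_labels_tuple : List (String × String)) (other_label : String) : List String × List String :=
  let kept := tokens_labels_tuple.filter (fun tl => tl.1 != "")
  let tokens := kept.map Prod.fst
  let labels := pvTagRuns other_label (kept.map Prod.snd)
  (tokens, labels)

-- ===== PRECONDITION & SPEC =====
def Spec_bio_tag_lbl_per_token (tokens_labels_tuple : List (String × String)) (other_label : String) (out : List String × List String) : Prop := out = bio_tag_lbl_per_token_alt tokens_labels_tuple other_label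
instance (tokens_labels_tuple : List (String × String)) (other_label : String) (out : List String × List String) : Decidable (Spec_bio_tag_lbl_per_token tokens_labels_tuple other_label out) := by unfold Spec_bio_tag_lbl_per_token; infer_instance

-- ===== CLAIM (what is proved, stated in full; the proofs are below) =====
def Claim_equal_bio_tag_lbl_per_token : Prop := ∀ (tokens_labels_tuple : List (String × String)) (other_label : String), Dom_bio_tag_lbl_per_token tokens_labels_tuple other_label → Spec_bio_tag_lbl_per_token tokens_labels_tuple other_label (bio_tag_lbl_per_token tokens_labels_tuple other_label)

-- ===== LEMMAS AND PROOFS =====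

-- named copy of A's loop body, for stating the fold invariant
def pvStepA (other_label : String) (st : Option String × List String × List String)
    (tl : String × String) : Option String × List String × List String :=
  let (previous_label, tokens, labels) := st
  if tl.1 == "" then st
  else
    let tokens := tokens ++ [tl.1]
    let labels :=
      if tl.2 == other_label then labels ++ [tl.2]
      else if previous_label == some tl.2 then labels ++ ["I-" ++ tl.2]
      else labels ++ ["B-" ++ tl.2]
    (some tl.2, tokens, labels)

lemma a_as_step (xs : List (String × String)) (other_label : String) :
    bio_tag_lbl_per_token xs other_label =
      ((xs.foldl (pvStepA other_label) (none, [], [])).2.1,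
       (xs.foldl (pvStepA other_label) (none, [], [])).2.2) := rfl

-- reference tagger: tag each label given the previous kept label
def pvTag (other_label : String) : Option String → List String → List String
  | _, [] => []
  | prev, l :: ls =>
      (if l == other_label then l
       else if prev == some l then "I-" ++ l
       else "B-" ++ l) :: pvTag other_label (some l) ls

-- A's fold from an arbitrary state, characterised via filter/map and the reference tagger
lemma a_fold_eq (other_label : String) (xs : List (String × String))
    (prev : Option String) (toks labs : List String) :
    (xs.foldl (pvStepA other_label) (prev, toks, labs)).2 =
    (toks ++ (xs.filter (fun tl => tl.1 != "")).map Prod.fst,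
     labs ++ pvTag other_label prev ((xs.filter (fun tl => tl.1 != "")).map Prod.snd)) := by
  induction xs generalizing prev toks labs with
  | nil => simp [pvTag]
  | cons x xs ih =>
    rw [List.foldl_cons]
    by_cases hx : x.1 = ""
    · have hstep : pvStepA other_label (prev, toks, labs) x = (prev, toks, labs) := by
        simp [pvStepA, hx]
      rw [hstep, ih]
      simp [hx]
    · have hx' : (x.1 == "") = false := by simp [hx]
      have hstep : pvStepA other_label (prev, toks, labs) x =
          (some x.2, toks ++ [x.1],
           labs ++ [if x.2 == other_label then x.2
                    else if prev == some x.2 then "I-" ++ x.2 else "B-" ++ x.2]) := by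
        simp only [pvStepA, hx', Bool.false_eq_true, if_false]
        split_ifs <;> rfl
      rw [hstep, ih]
      have hf : List.filter (fun tl => tl.1 != "") (x :: xs) =
          x :: List.filter (fun tl => tl.1 != "") xs := by
        simp [hx]
      rw [hf]
      simp only [List.map_cons, pvTag]
      simp [List.append_assoc]

-- tagging a run of labels all equal to l, starting with prev = some l, gives bulk I-/plain tags
lemma pvTag_run (other_label l : String) (run rest : List String)
    (h : ∀ x ∈ run, x = l) :
    pvTag other_label (some l) (run ++ rest) =
      (if l == other_label then List.replicate run.length l
       else List.replicate run.length ("I-" ++ l)) ++ pvTag other_label (some l) rest := by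
  induction run with
  | nil => simp
  | cons x run ih =>
    have hx : x = l := h x (List.mem_cons_self)
    subst hx
    have := ih (fun y hy => h y (List.mem_cons_of_mem _ hy))
    by_cases ho : (x == other_label) = true <;>
      simp [pvTag, this, ho, List.replicate_succ]

-- the head of a dropWhile does not satisfy the predicate
lemma head_dropWhile_false {α : Type} (p : α → Bool) (ls : List α) (h : α)
    (hh : (ls.dropWhile p).head? = some h) : p h = false := by
  induction ls with
  | nil => simp [List.dropWhile] at hh
  | cons x ls ih =>
    by_cases hp : p x
    · exact ih (by simpa [List.dropWhile, hp] using hh)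
    · have : (List.dropWhile p (x :: ls)) = x :: ls := by simp [List.dropWhile, hp]
      rw [this] at hh
      simp at hh
      subst hh
      simpa using hp

-- the stateful tagger equals the run-length tagger when prev differs from the head
lemma pvTag_eq_runs (other_label : String) (ls : List String) (prev : Option String)
    (h : ∀ l, ls.head? = some l → prev ≠ some l) :
    pvTag other_label prev ls = pvTagRuns other_label ls := by
  induction hls : ls.length using Nat.strong_induction_on generalizing ls prev with
  | _ n ih =>
  cases ls with
  | nil => simp [pvTag, pvTagRuns]
  | cons l tl =>
    have hprev : prev ≠ some l := h l rfl
    have hhd : (if l == other_label then l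
        else if prev == some l then "I-" ++ l else "B-" ++ l) =
        (if l == other_label then l else "B-" ++ l) := by
      have : (prev == some l) = false := by simpa using hprev
      simp [this]
    have hsplit : tl = tl.takeWhile (fun x => x == l) ++ tl.dropWhile (fun x => x == l) :=
      (List.takeWhile_append_dropWhile).symm
    have hrun : ∀ x ∈ tl.takeWhile (fun x => x == l), x = l := by
      intro x hx
      have := List.mem_takeWhile_imp hx
      simpa using this
    have hlt : (tl.dropWhile (fun x => x == l)).length < n := by
      subst hls
      simp only [List.length_cons]
      exact Nat.lt_succ_of_le (List.length_dropWhile_le _ _)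
    have hcond : ∀ l', (tl.dropWhile (fun x => x == l)).head? = some l' →
        (some l : Option String) ≠ some l' := by
      intro l' hl'
      have hne := head_dropWhile_false (fun x => x == l) tl l' hl'
      simp only [beq_eq_false_iff_ne, ne_eq] at hne
      simp only [ne_eq, Option.some.injEq]
      exact fun h => hne h.symm
    have hrec : pvTag other_label (some l) (tl.dropWhile (fun x => x == l)) =
        pvTagRuns other_label (tl.dropWhile (fun x => x == l)) :=
      ih _ hlt _ (some l) hcond rfl
    calc pvTag other_label prev (l :: tl)
        = (if l == other_label then l else "B-" ++ l) ::
            pvTag other_label (some l) tl := by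
          simp only [pvTag, hhd]
      _ = (if l == other_label then l else "B-" ++ l) ::
            ((if l == other_label then List.replicate (tl.takeWhile (fun x => x == l)).length l
              else List.replicate (tl.takeWhile (fun x => x == l)).length ("I-" ++ l)) ++
             pvTag other_label (some l) (tl.dropWhile (fun x => x == l))) := by
          conv_lhs => rw [hsplit]
          rw [pvTag_run other_label l _ _ hrun]
      _ = pvTagRuns other_label (l :: tl) := by
          rw [hrec]
          conv_rhs => rw [pvTagRuns]
          split_ifs with ho <;> simp [List.replicate_succ]

-- ===== VERDICT (by name: the statement is the Claim_ definition above) =====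
theorem bio_tag_lbl_per_token_spec : Claim_equal_bio_tag_lbl_per_token := by
  intro xs other _
  show _ = _
  rw [a_as_step, a_fold_eq]
  simp only [bio_tag_lbl_per_token_alt]
  rw [pvTag_eq_runs other _ none (by intro l _ h; cases h)]
  simp
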